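-- pv_equiv track=rewrite | github.com/michalholes/patchhub | scripts/am_patch/gate_badguys.py | append_no_suite_jail
-- ===== SOURCE A (Python) =====
-- DEFAULT_BADGUYS_COMMAND = ["badguys/badguys.py", "-q"]
--
-- def append_no_suite_jail(command: list[str]) -> list[str]:
--     argv = [str(item) for item in command if str(item).strip()]
--     if not argv:
--         argv = list(DEFAULT_BADGUYS_COMMAND)
--     count = sum(1 for item in argv if item == "--no-suite-jail")
--     if count == 0:
--         argv.append("--no-suite-jail")
--     elif count > 1:
--         first = False
--         deduped: list[str] = []
--         for item in argv:
--             if item != "--no-suite-jail":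
--                 deduped.append(item)
--                 continue
--             if not first:
--                 deduped.append(item)
--                 first = True
--         argv = deduped
--     return argv
-- ===== SOURCE B (Python) =====
-- DEFAULT_BADGUYS_COMMAND = ["badguys/badguys.py", "-q"]
--
-- FLAG = "--no-suite-jail"
--
-- def append_no_suite_jail(command: list[str]) -> list[str]:
--     argv = [str(item) for item in command if str(item).strip()]
--     if not argv:
--         argv = list(DEFAULT_BADGUYS_COMMAND)
--     result: list[str] = []
--     seen = False
--     for item in argv:
--         if item != FLAG:
--             result.append(item)
--         elif not seen:
--             result.append(item)
--             seen = True
--     if not seen: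
--         result.append(FLAG)
--     return result
-- ===== Notes on version B (the rewrite author's own statement) =====
-- stated objective: simpler
-- what changed: Replaces the count-then-three-way-branch (separate counting pass plus a conditional dedup pass) with a single pass that keeps the first '--no-suite-jail', drops the rest, and appends the flag once at the end if it was never seen.
import Mathlib
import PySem

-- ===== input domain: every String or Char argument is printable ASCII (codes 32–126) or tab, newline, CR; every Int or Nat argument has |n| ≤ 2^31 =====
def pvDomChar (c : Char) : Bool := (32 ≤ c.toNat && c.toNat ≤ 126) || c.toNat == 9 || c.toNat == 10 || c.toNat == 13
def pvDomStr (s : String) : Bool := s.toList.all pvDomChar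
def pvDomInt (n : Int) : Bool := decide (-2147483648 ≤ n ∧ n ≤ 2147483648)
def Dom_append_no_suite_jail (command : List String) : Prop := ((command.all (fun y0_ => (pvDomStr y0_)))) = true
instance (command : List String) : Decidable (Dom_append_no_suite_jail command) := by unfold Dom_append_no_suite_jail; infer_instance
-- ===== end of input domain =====

-- B replaces A's count-then-branch (count pass + optional dedup pass / append) with one
-- keep-first pass plus a final conditional append; objective: simpler.

-- ===== PORT A =====
def append_no_suite_jail (command : List String) : List String :=
  let argv := command.filter (fun item => !(PySem.Str.strip item).isEmpty)
  let argv := if argv = [] then ["badguys/badguys.py", "-q"] else argv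
  let count : Int := argv.foldl (fun n item => if item = "--no-suite-jail" then n + 1 else n) 0
  if count = 0 then argv ++ ["--no-suite-jail"]
  else if count > 1 then
    (argv.foldl (fun (st : Bool × List String) item =>
      if item ≠ "--no-suite-jail" then (st.1, st.2 ++ [item])
      else if st.1 = false then (true, st.2 ++ [item])
      else st) (false, [])).2
  else argv

-- ===== PORT B =====
-- one pass: keep every non-flag item, keep the flag only the first time; append it if never seen
def pvAltGo : Bool → List String → List String
  | seen, [] => if seen then [] else ["--no-suite-jail"]
  | seen, item :: rest =>
    if item ≠ "--no-suite-jail" then item :: pvAltGo seen rest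
    else if seen then pvAltGo seen rest
    else item :: pvAltGo true rest

def append_no_suite_jail_alt (command : List String) : List String :=
  let argv := command.filter (fun item => !(PySem.Str.strip item).isEmpty)
  let argv := if argv = [] then ["badguys/badguys.py", "-q"] else argv
  pvAltGo false argv

-- ===== PRECONDITION & SPEC =====
def Spec_append_no_suite_jail (command : List String) (out : List String) : Prop := out = append_no_suite_jail_alt command
instance (command : List String) (out : List String) : Decidable (Spec_append_no_suite_jail command out) := by unfold Spec_append_no_suite_jail; infer_instance

-- ===== CLAIM (what is proved, stated in full; the proofs are below) =====
def Claim_equal_append_no_suite_jail : Prop := ∀ (command : List String), Dom_append_no_suite_jail command → Spec_append_no_suite_jail command (append_no_suite_jail command)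

-- ===== LEMMAS AND PROOFS =====

-- proof-side copy of A's dedup loop as a structural recursion (no trailing append)
def pvDed : Bool → List String → List String
  | _, [] => []
  | seen, item :: rest =>
    if item ≠ "--no-suite-jail" then item :: pvDed seen rest
    else if seen then pvDed seen rest
    else item :: pvDed true rest

theorem pvGo_true_nm (l : List String) (h : "--no-suite-jail" ∉ l) : pvAltGo true l = l := by
  induction l with
  | nil => simp [pvAltGo]
  | cons x r ih =>
    simp only [List.mem_cons] at h
    push_neg at h
    simp [pvAltGo, Ne.symm h.1, ih h.2]

theorem pvGo_false_nm (l : List String) (h : "--no-suite-jail" ∉ l) :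
    pvAltGo false l = l ++ ["--no-suite-jail"] := by
  induction l with
  | nil => simp [pvAltGo]
  | cons x r ih =>
    simp only [List.mem_cons] at h
    push_neg at h
    simp [pvAltGo, Ne.symm h.1, ih h.2]

theorem pvGo_true_ded (l : List String) : pvAltGo true l = pvDed true l := by
  induction l with
  | nil => simp [pvAltGo, pvDed]
  | cons x r ih =>
    by_cases hx : x = "--no-suite-jail" <;> simp [pvAltGo, pvDed, hx, ih]

theorem pvGo_false_mem (l : List String) (h : "--no-suite-jail" ∈ l) :
    pvAltGo false l = pvDed false l := by
  induction l with
  | nil => simp at h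
  | cons x r ih =>
    by_cases hx : x = "--no-suite-jail"
    · simp [pvAltGo, pvDed, hx, pvGo_true_ded]
    · rcases List.mem_cons.mp h with h1 | h2
      · exact absurd h1.symm hx
      · simp [pvAltGo, pvDed, hx, ih h2]

theorem pvFoldl_ded (l : List String) (b : Bool) (acc : List String) :
    (l.foldl (fun (st : Bool × List String) item =>
      if item ≠ "--no-suite-jail" then (st.1, st.2 ++ [item])
      else if st.1 = false then (true, st.2 ++ [item])
      else st) (b, acc)).2 = acc ++ pvDed b l := by
  induction l generalizing b acc with
  | nil => simp [pvDed]
  | cons x r ih =>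
    rw [List.foldl_cons]
    by_cases hx : x = "--no-suite-jail"
    · cases b
      · simpa [pvDed, hx] using ih true (acc ++ [x])
      · simpa [pvDed, hx] using ih true acc
    · simpa [pvDed, hx] using ih b (acc ++ [x])

theorem pvCnt (l : List String) (n : Int) :
    l.foldl (fun n item => if item = "--no-suite-jail" then n + 1 else n) n
      = n + (l.count "--no-suite-jail" : Int) := by
  induction l generalizing n with
  | nil => simp
  | cons x r ih =>
    by_cases hx : x = "--no-suite-jail" <;>
      simp [hx, ih, List.count_cons] <;> ring

theorem pvGo_count_one (l : List String) (h : l.count "--no-suite-jail" = 1) :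
    pvAltGo false l = l := by
  induction l with
  | nil => simp at h
  | cons x r ih =>
    by_cases hx : x = "--no-suite-jail"
    · rw [List.count_cons] at h
      simp [hx] at h
      have hr : "--no-suite-jail" ∉ r := List.count_eq_zero.mp h
      simp [pvAltGo, hx, pvGo_true_nm r hr]
    · rw [List.count_cons] at h
      simp [hx] at h
      simp [pvAltGo, hx, ih h]

theorem pvMain (l : List String) :
    (let count : Int := l.foldl (fun n item => if item = "--no-suite-jail" then n + 1 else n) 0
     if count = 0 then l ++ ["--no-suite-jail"]
     else if count > 1 then
       (l.foldl (fun (st : Bool × List String) item =>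
         if item ≠ "--no-suite-jail" then (st.1, st.2 ++ [item])
         else if st.1 = false then (true, st.2 ++ [item])
         else st) (false, [])).2
     else l) = pvAltGo false l := by
  simp only [pvCnt, Int.zero_add]
  rcases Nat.lt_or_ge (l.count "--no-suite-jail") 1 with hc | hc
  · have h0 : l.count "--no-suite-jail" = 0 := by omega
    have hm : "--no-suite-jail" ∉ l := List.count_eq_zero.mp h0
    simp [h0, pvGo_false_nm l hm]
  · rcases Nat.lt_or_ge (l.count "--no-suite-jail") 2 with hc2 | hc2
    · have h1 : l.count "--no-suite-jail" = 1 := by omega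
      have : ¬ ((l.count "--no-suite-jail" : Int) = 0) := by omega
      have h1' : ¬ ((l.count "--no-suite-jail" : Int) > 1) := by omega
      simp only [this, h1', if_false, if_neg]
      exact (pvGo_count_one l h1).symm
    · have hm : "--no-suite-jail" ∈ l := by
        apply List.count_pos_iff.mp; omega
      have hne : ¬ ((l.count "--no-suite-jail" : Int) = 0) := by omega
      have hgt : (l.count "--no-suite-jail" : Int) > 1 := by exact_mod_cast hc2
      simp only [hne, hgt, if_false, if_true, if_pos]
      rw [pvFoldl_ded, pvGo_false_mem l hm]
      simp

-- ===== VERDICT (by name: the statement is the Claim_ definition above) =====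
theorem append_no_suite_jail_spec : Claim_equal_append_no_suite_jail := by
  intro command _
  unfold Spec_append_no_suite_jail append_no_suite_jail append_no_suite_jail_alt
  exact pvMain _
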